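-- pv_equiv track=rewrite | github.com/Hussam-Haddadi/capstone-project-nd1 | nidd_api/twilio_relay.py | _normalize_whatsapp_addr
-- ===== SOURCE A (Python) =====
-- from typing import Any, Callable, Dict, List, Optional
--
-- def _normalize_whatsapp_addr(raw: Optional[str]) -> str:
--     """E.164 after whatsapp: — strips quotes and duplicate whatsapp: prefixes."""
--     if not raw:
--         return ""
--     s = raw.strip().strip('"').strip("'")
--     s = " ".join(s.split())
--     if not s:
--         return ""
--     while s.lower().startswith("whatsapp:"):
--         s = s[9:].strip()
--     if not s:
--         return ""
--     return f"whatsapp:{s}"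
-- ===== SOURCE B (Python) =====
-- from typing import Optional
--
-- def _normalize_whatsapp_addr(raw: Optional[str]) -> str:
--     """E.164 after whatsapp: — single index scan past stacked whatsapp: prefixes."""
--     if not raw:
--         return ""
--     s = " ".join(raw.strip().strip('"').strip("'").split())
--     n = len(s)
--     i = 0
--     while s[i:i + 9].lower() == "whatsapp:":
--         i += 9
--         while i < n and s[i] == " ":
--             i += 1
--     rest = s[i:]
--     return "whatsapp:" + rest if rest else ""
-- ===== Notes on version B (the rewrite author's own statement) =====
-- stated objective: alternative
-- what changed: A's peeling loop that repeatedly lowercases, tests startswith and rebuilds the remaining string with slice-and-strip is replaced by a single cut-index scan: an integer pointer advances 9 past each case-insensitive prefix match and skips spaces with an inner loop, and the string is sliced once at the end.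
import Mathlib
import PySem

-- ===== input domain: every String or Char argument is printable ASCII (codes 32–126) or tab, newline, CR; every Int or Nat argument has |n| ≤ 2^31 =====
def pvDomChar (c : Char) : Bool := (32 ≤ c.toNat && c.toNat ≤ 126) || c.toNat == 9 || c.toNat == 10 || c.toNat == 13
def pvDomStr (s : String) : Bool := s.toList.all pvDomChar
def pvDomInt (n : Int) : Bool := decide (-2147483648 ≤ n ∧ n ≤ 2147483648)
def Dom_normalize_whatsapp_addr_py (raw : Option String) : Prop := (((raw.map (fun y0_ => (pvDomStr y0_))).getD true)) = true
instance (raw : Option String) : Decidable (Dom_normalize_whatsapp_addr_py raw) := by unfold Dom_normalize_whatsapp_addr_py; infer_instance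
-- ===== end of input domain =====

-- B replaces A's repeated lower()/startswith/slice-and-strip string rebuilding with a single
-- cut-index scan (pointer += 9 per case-insensitive prefix, inner space-skip loop, one final slice).

-- ===== PORT A =====
-- while s.lower().startswith("whatsapp:"): s = s[9:].strip()   (fuel = initial length, ample: each pass removes ≥ 9 chars)
def loopA : Nat → List Char → List Char
  | 0, s => s
  | fuel+1, s =>
    if PySem.Chars.startswith (PySem.Chars.lower s) "whatsapp:".toList then
      loopA fuel (PySem.Chars.strip (PySem.Chars.slice s (some 9) none))
    else s

def normalize_whatsapp_addr_py (raw : Option String) : String :=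
  match raw with
  | none => ""
  | some r =>
    if r.toList.isEmpty then "" else
    let s := PySem.Chars.join [' '] (PySem.Chars.split₀
      (PySem.Chars.stripChars (PySem.Chars.stripChars (PySem.Chars.strip r.toList) ['"']) ['\'']))
    if s.isEmpty then "" else
    let t := loopA s.length s
    if t.isEmpty then "" else String.ofList ("whatsapp:".toList ++ t)

-- ===== PORT B =====
-- inner loop: while i < n and s[i] == " ": i += 1   (fuel = length, ample: i rises each pass)
def altSkip (s : List Char) : Nat → Nat → Nat
  | 0, i => i
  | fuel+1, i =>
    if i < s.length && (PySem.List.pyGet? s (i:Int) == some ' ') then altSkip s fuel (i+1) else i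

-- outer loop: while s[i:i+9].lower() == "whatsapp:": i += 9; <skip spaces>
def altLoop (s : List Char) : Nat → Nat → Nat
  | 0, i => i
  | fuel+1, i =>
    if PySem.Chars.lower (PySem.Chars.slice s (some (i:Int)) (some ((i:Int)+9))) = "whatsapp:".toList then
      altLoop s fuel (altSkip s s.length (i+9))
    else i

def normalize_whatsapp_addr_py_alt (raw : Option String) : String :=
  match raw with
  | none => ""
  | some r =>
    if r.toList.isEmpty then "" else
    let s := PySem.Chars.join [' '] (PySem.Chars.split₀
      (PySem.Chars.stripChars (PySem.Chars.stripChars (PySem.Chars.strip r.toList) ['"']) ['\'']))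
    let i := altLoop s s.length 0
    let rest := PySem.Chars.slice s (some (i:Int)) none
    if rest.isEmpty then "" else String.ofList ("whatsapp:".toList ++ rest)

-- ===== PRECONDITION & SPEC =====
def Spec_normalize_whatsapp_addr_py (raw : Option String) (out : String) : Prop := out = normalize_whatsapp_addr_py_alt raw
instance (raw : Option String) (out : String) : Decidable (Spec_normalize_whatsapp_addr_py raw out) := by unfold Spec_normalize_whatsapp_addr_py; infer_instance

-- ===== CLAIM (what is proved, stated in full; the proofs are below) =====
def Claim_equal_normalize_whatsapp_addr_py : Prop := ∀ (raw : Option String), Dom_normalize_whatsapp_addr_py raw → Spec_normalize_whatsapp_addr_py raw (normalize_whatsapp_addr_py raw)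

-- ===== LEMMAS AND PROOFS =====

-- getLast? of a nonempty suffix is the getLast? of the whole list
theorem pv_getLast?_of_suffix {l₂ l₁ : List Char} (h : l₂ <:+ l₁) (h2 : l₂ ≠ []) :
    l₂.getLast? = l₁.getLast? := by
  obtain ⟨t, rfl⟩ := h
  exact (List.getLast?_append_of_ne_nil t h2).symm

-- rstrip is the identity on a list whose last char is not whitespace
theorem pv_rstrip_eq_self (v : List Char)
    (h : ∀ c, v.getLast? = some c → PySem.Chars.isspace c = false) :
    PySem.Chars.rstrip v = v := by
  rcases hrev : v.reverse with _ | ⟨c, tl⟩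
  · have : v = [] := by simpa using congrArg List.reverse hrev
    simp [this, PySem.Chars.rstrip]
  · have hlast : v.getLast? = some c := by
      rw [← List.head?_reverse, hrev]; rfl
    have hc := h c hlast
    simp [PySem.Chars.rstrip, hrev, hc]
    simpa using congrArg List.reverse hrev.symm

-- strip of a suffix of s equals dropWhile isspace, when s does not end in whitespace
theorem pv_strip_drop (s : List Char)
    (h2 : ∀ c, s.getLast? = some c → PySem.Chars.isspace c = false) (j : Nat) :
    PySem.Chars.strip (s.drop j) = (s.drop j).dropWhile PySem.Chars.isspace := by
  unfold PySem.Chars.strip PySem.Chars.lstrip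
  apply pv_rstrip_eq_self
  intro c hc
  have hne : (s.drop j).dropWhile PySem.Chars.isspace ≠ [] := by
    intro hnil; rw [hnil] at hc; simp at hc
  have hsuf : (s.drop j).dropWhile PySem.Chars.isspace <:+ s :=
    (List.dropWhile_suffix _).trans (List.drop_suffix j s)
  rw [pv_getLast?_of_suffix hsuf hne] at hc
  exact h2 c hc

-- dropWhile isspace = dropWhile (== ' ') on lists whose only whitespace char is ' '
theorem pv_dropWhile_space (u : List Char)
    (h1 : ∀ c ∈ u, PySem.Chars.isspace c = true → c = ' ') :
    u.dropWhile PySem.Chars.isspace = u.dropWhile (fun c => c == ' ') := by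
  induction u with
  | nil => rfl
  | cons c tl ih =>
    have hc : PySem.Chars.isspace c = (c == ' ') := by
      by_cases h : c = ' '
      · subst h; decide
      · have : PySem.Chars.isspace c = false := by
          cases hs : PySem.Chars.isspace c
          · rfl
          · exact absurd (h1 c (by simp) hs) h
        simp [this, h]
    rw [List.dropWhile_cons, List.dropWhile_cons, hc]
    split
    · exact ih (fun d hd => h1 d (by simp [hd]))
    · rfl

-- altSkip lands exactly past the leading spaces of the suffix
theorem pv_skip_eq (s : List Char) : ∀ fuel j, s.length ≤ j + fuel →
    s.drop (altSkip s fuel j) = (s.drop j).dropWhile (fun c => c == ' ') := by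
  intro fuel
  induction fuel with
  | zero =>
    intro j hj
    have : s.drop j = [] := List.drop_eq_nil_of_le (by omega)
    simp [altSkip, this]
  | succ n ih =>
    intro j hj
    rw [altSkip]
    by_cases hlt : j < s.length
    · have hdrop : s.drop j = s[j] :: s.drop (j+1) := List.drop_eq_getElem_cons hlt
      by_cases hsp : s[j] = ' '
      · have hcond : (j < s.length && (PySem.List.pyGet? s (j:Int) == some ' ')) = true := by
          simp [hlt, hsp]
        rw [hcond]
        simp only [if_true]
        rw [ih (j+1) (by omega), hdrop, List.dropWhile_cons]
        simp [hsp]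
      · have hcond : (j < s.length && (PySem.List.pyGet? s (j:Int) == some ' ')) = false := by
          simp [PySem.List.pyGet?_natCast, List.getElem?_eq_getElem hlt, hsp]
        rw [hcond]
        simp only [if_false, Bool.false_eq_true]
        rw [hdrop, List.dropWhile_cons]
        simp [hsp]
    · have hcond : (j < s.length && (PySem.List.pyGet? s (j:Int) == some ' ')) = false := by
        simp [hlt]
      rw [hcond]
      have : s.drop j = [] := List.drop_eq_nil_of_le (by omega)
      simp [this]

-- isPrefixOf as an equality of the take
theorem pv_isPrefixOf_take (w u : List Char) :
    w.isPrefixOf u = decide (u.take w.length = w) := by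
  rw [Bool.eq_iff_iff]
  simp only [List.isPrefixOf_iff_prefix, List.prefix_iff_eq_take, decide_eq_true_eq]
  exact eq_comm

-- the two loop conditions agree on the suffix at i
theorem pv_cond_eq (s : List Char) (i : Nat) :
    PySem.Chars.startswith (PySem.Chars.lower (s.drop i)) "whatsapp:".toList =
      decide (PySem.Chars.lower (PySem.Chars.slice s (some (i:Int)) (some ((i:Int)+9))) = "whatsapp:".toList) := by
  have hslice : PySem.Chars.slice s (some (i:Int)) (some ((i:Int)+9)) = (s.drop i).take 9 := by
    rw [PySem.Chars.slice_eq_listSlice,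
        show ((i:Int)+9) = ((i:Int) + ((9:Nat):Int)) by norm_num,
        PySem.List.slice_natCast_add]
  rw [hslice]
  unfold PySem.Chars.startswith PySem.Chars.lower
  have hlen : ("whatsapp:".toList).length = 9 := by decide
  rw [List.map_take, pv_isPrefixOf_take, hlen]

-- loop simulation: A's peeled suffix is s dropped at B's cut index
theorem pv_loop_sim (s : List Char)
    (h1 : ∀ c ∈ s, PySem.Chars.isspace c = true → c = ' ')
    (h2 : ∀ c, s.getLast? = some c → PySem.Chars.isspace c = false) :
    ∀ fuel i, loopA fuel (s.drop i) = s.drop (altLoop s fuel i) := by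
  intro fuel
  induction fuel with
  | zero => intro i; rfl
  | succ n ih =>
    intro i
    rw [loopA, altLoop]
    rw [pv_cond_eq s i]
    by_cases hc : PySem.Chars.lower (PySem.Chars.slice s (some (i:Int)) (some ((i:Int)+9))) = "whatsapp:".toList
    · simp only [hc, decide_true, if_true]
      have hslice9 : PySem.Chars.slice (s.drop i) (some 9) none = s.drop (i + 9) := by
        rw [PySem.Chars.slice_eq_listSlice, PySem.List.slice_from (s.drop i) (a := 9) (by norm_num),
            List.drop_drop]
        norm_num
        omega
      rw [hslice9, pv_strip_drop s h2 (i+9),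
          pv_dropWhile_space _ (fun c hc' hs => h1 c (List.mem_of_mem_drop hc') hs),
          ← pv_skip_eq s s.length (i+9) (by omega)]
      exact ih (altSkip s s.length (i+9))
    · have hb : decide (PySem.Chars.lower (PySem.Chars.slice s (some (i:Int)) (some ((i:Int)+9)))
          = "whatsapp:".toList) = false := by simpa using hc
      rw [hb, if_neg hc]
      simp

-- every word of s.split() is nonempty and whitespace-free
theorem pv_split₀_go_words (u : List Char) : ∀ (cur : List Char) (acc : List (List Char)),
    (∀ c ∈ cur, PySem.Chars.isspace c = false) →
    (∀ w ∈ acc, w ≠ [] ∧ ∀ c ∈ w, PySem.Chars.isspace c = false) →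
    ∀ w ∈ PySem.Chars.split₀.go u cur acc, w ≠ [] ∧ ∀ c ∈ w, PySem.Chars.isspace c = false := by
  induction u with
  | nil =>
    intro cur acc hcur hacc w hw
    rw [PySem.Chars.split₀.go] at hw
    by_cases hce : cur.isEmpty
    · simp [hce] at hw
      exact hacc w hw
    · simp [hce] at hw
      rcases hw with hw | rfl
      · exact hacc w hw
      · constructor
        · simpa [List.isEmpty_iff] using hce
        · intro c hcm; exact hcur c (by simpa using hcm)
  | cons c rest ih =>
    intro cur acc hcur hacc w hw
    rw [PySem.Chars.split₀.go] at hw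
    by_cases hsp : PySem.Chars.isspace c
    · by_cases hce : cur.isEmpty
      · simp only [hsp, hce, if_true] at hw
        exact ih [] acc (by simp) hacc w hw
      · simp only [hsp, hce, if_true, if_false, Bool.false_eq_true] at hw
        refine ih [] _ (by simp) ?_ w hw
        intro w' hw'
        rcases List.mem_cons.mp hw' with rfl | hw'
        · constructor
          · simpa [List.isEmpty_iff] using hce
          · intro d hd; exact hcur d (by simpa using hd)
        · exact hacc w' hw'
    · simp only [hsp, Bool.false_eq_true, if_false] at hw
      refine ih (c :: cur) acc ?_ hacc w hw
      intro d hd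
      rcases List.mem_cons.mp hd with rfl | hd
      · simpa using hsp
      · exact hcur d hd

theorem pv_split₀_words (u : List Char) :
    ∀ w ∈ PySem.Chars.split₀ u, w ≠ [] ∧ ∀ c ∈ w, PySem.Chars.isspace c = false := by
  unfold PySem.Chars.split₀
  exact pv_split₀_go_words u [] [] (by simp) (by simp)

-- the only whitespace char in " ".join(words) is ' '
theorem pv_join_chars (parts : List (List Char))
    (hw : ∀ w ∈ parts, ∀ c ∈ w, PySem.Chars.isspace c = false) :
    ∀ c ∈ PySem.Chars.join [' '] parts, PySem.Chars.isspace c = true → c = ' ' := by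
  induction parts with
  | nil => intro c hc; rw [PySem.Chars.join_nil] at hc; simp at hc
  | cons a tl ih =>
    cases tl with
    | nil =>
      intro c hc hs
      rw [PySem.Chars.join_singleton] at hc
      exact absurd (hw a (by simp) c hc) (by simp [hs])
    | cons b l =>
      intro c hc hs
      rw [PySem.Chars.join_cons_cons] at hc
      simp only [List.append_assoc, List.mem_append] at hc
      rcases hc with hc | hc | hc
      · exact absurd (hw a (by simp) c hc) (by simp [hs])
      · simpa using hc
      · exact ih (fun w hw' => hw w (by simp [hw'])) c hc hs

theorem pv_join_ne_nil (b : List Char) (l : List (List Char)) (hb : b ≠ []) :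
    PySem.Chars.join [' '] (b :: l) ≠ [] := by
  cases l with
  | nil => rw [PySem.Chars.join_singleton]; exact hb
  | cons b' l' =>
    rw [PySem.Chars.join_cons_cons]
    intro h
    rcases List.append_eq_nil_iff.mp h with ⟨h1, _⟩
    rcases List.append_eq_nil_iff.mp h1 with ⟨_, h3⟩
    simp at h3

-- " ".join(words) does not end in whitespace
theorem pv_join_last (parts : List (List Char))
    (hw : ∀ w ∈ parts, w ≠ [] ∧ ∀ c ∈ w, PySem.Chars.isspace c = false) :
    ∀ c, (PySem.Chars.join [' '] parts).getLast? = some c → PySem.Chars.isspace c = false := by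
  induction parts with
  | nil => intro c hc; rw [PySem.Chars.join_nil] at hc; simp at hc
  | cons a tl ih =>
    cases tl with
    | nil =>
      intro c hc
      rw [PySem.Chars.join_singleton] at hc
      exact (hw a (by simp)).2 c (List.mem_of_getLast? hc)
    | cons b l =>
      intro c hc
      rw [PySem.Chars.join_cons_cons, List.append_assoc,
          List.getLast?_append_of_ne_nil] at hc
      · refine ih (fun w hw' => hw w (by simp [hw'])) c ?_
        rw [List.getLast?_append_of_ne_nil] at hc
        · exact hc
        · exact pv_join_ne_nil b l (hw b (by simp)).1
      · intro h
        rcases List.append_eq_nil_iff.mp h with ⟨_, h2⟩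
        exact pv_join_ne_nil b l (hw b (by simp)).1 h2

-- ===== VERDICT (by name: the statement is the Claim_ definition above) =====
theorem normalize_whatsapp_addr_py_spec : Claim_equal_normalize_whatsapp_addr_py := by
  unfold Claim_equal_normalize_whatsapp_addr_py
  intro raw _
  unfold Spec_normalize_whatsapp_addr_py normalize_whatsapp_addr_py normalize_whatsapp_addr_py_alt
  cases raw with
  | none => rfl
  | some r =>
    by_cases hr : r.toList.isEmpty
    · simp [hr]
    · simp only [hr, Bool.false_eq_true, if_false]
      set s := PySem.Chars.join [' '] (PySem.Chars.split₀
        (PySem.Chars.stripChars (PySem.Chars.stripChars (PySem.Chars.strip r.toList) ['"']) ['\''])) with hs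
      have hwords := pv_split₀_words
        (PySem.Chars.stripChars (PySem.Chars.stripChars (PySem.Chars.strip r.toList) ['"']) ['\''])
      have h1 : ∀ c ∈ s, PySem.Chars.isspace c = true → c = ' ' :=
        pv_join_chars _ (fun w hw c hc => (hwords w hw).2 c hc)
      have h2 : ∀ c, s.getLast? = some c → PySem.Chars.isspace c = false :=
        pv_join_last _ hwords
      have hrest : PySem.Chars.slice s (some ((altLoop s s.length 0 : Nat):Int)) none
          = s.drop (altLoop s s.length 0) := by
        rw [PySem.Chars.slice_eq_listSlice,
            PySem.List.slice_from s (a := ((altLoop s s.length 0 : Nat):Int)) (by positivity),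
            Int.toNat_natCast]
      have hmain : loopA s.length s = s.drop (altLoop s s.length 0) := by
        have h0 := pv_loop_sim s h1 h2 s.length 0
        rwa [List.drop_zero] at h0
      by_cases hse : s.isEmpty
      · have hnil : s = [] := by simpa [List.isEmpty_iff] using hse
        rw [hnil]
        rfl
      · rw [if_neg hse, hmain, hrest]
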